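-- pv_equiv track=rewrite | github.com/narajoEmmanuel/Python-Algorithm-Analysis | main.py | cuenta_palabras
-- ===== SOURCE A (Python) =====
-- def  cuenta_palabras(tupla1,tupla2):
--     """
--     Funcion: Cuenta la cantidad de palabras a buscar en una frase.
--     Entrada: Recibe dos tuplas cuyo contenido es tipo string.
--     Salida: Retorna un diccionario que indica la cantidad de palabras encontradas en una frase.
--     """
--     try:
--         diccionario={}
--         tuplado=[]
--         i=0
--         while i<len(tupla2):
--             tuplado+=tupla2[i].split()
--             i+=1
--         for elemento in tupla1:
--             diccionario[elemento]=tuplado.count(elemento)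
--         return diccionario
--     except:
--         return "Ha ocurrido un error durante la ejecución del ejercicio."
-- ===== SOURCE B (Python) =====
-- def cuenta_palabras(tupla1, tupla2):
--     """
--     Funcion: Cuenta la cantidad de palabras a buscar en una frase.
--     Entrada: Recibe dos tuplas cuyo contenido es tipo string.
--     Salida: Retorna un diccionario que indica la cantidad de palabras encontradas en una frase.
--     """
--     try:
--         diccionario = {}
--         for elemento in tupla1:
--             diccionario[elemento] = 0
--         for frase in tupla2:
--             for palabra in frase.split():
--                 if palabra in diccionario:
--                     diccionario[palabra] += 1
--         return diccionario
--     except: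
--         return "Ha ocurrido un error durante la ejecución del ejercicio."
-- ===== Notes on version B (the rewrite author's own statement) =====
-- stated objective: faster
-- what changed: Instead of materialising the full flattened word list and rescanning it once per query word (tuplado.count), B seeds the dict with zeros in tupla1 order and makes a single pass over the phrases' words, incrementing a counter only for words already in the dict.
import Mathlib
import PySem

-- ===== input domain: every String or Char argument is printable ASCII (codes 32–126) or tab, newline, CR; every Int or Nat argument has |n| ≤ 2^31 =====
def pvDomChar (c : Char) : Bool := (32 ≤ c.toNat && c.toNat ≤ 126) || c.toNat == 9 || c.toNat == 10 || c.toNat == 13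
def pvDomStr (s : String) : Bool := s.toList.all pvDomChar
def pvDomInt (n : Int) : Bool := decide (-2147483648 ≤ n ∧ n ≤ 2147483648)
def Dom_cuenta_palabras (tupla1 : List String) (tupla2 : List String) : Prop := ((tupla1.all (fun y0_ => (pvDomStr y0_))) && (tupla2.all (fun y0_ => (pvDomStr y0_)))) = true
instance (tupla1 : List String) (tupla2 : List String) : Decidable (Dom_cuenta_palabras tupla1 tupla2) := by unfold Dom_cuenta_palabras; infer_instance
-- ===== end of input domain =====

-- B replaces A's "flatten all phrases, then rescan the flat list once per query word"
-- with "seed the query words with 0, then one pass over the words incrementing matches" (faster).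
-- On list-of-string inputs A's try/except never fires, so both functions are total here.

-- ===== PORT A =====
-- while i < len(tupla2): tuplado += tupla2[i].split(); for elemento in tupla1: dicc[elemento] = tuplado.count(elemento)
def cuenta_palabras (tupla1 : List String) (tupla2 : List String) : List (String × Int) :=
  let tuplado : List String := tupla2.foldl (fun acc s => acc ++ PySem.Str.split₀ s) []
  let diccionario : PySem.Dict String Int :=
    tupla1.foldl (fun d e => d.insert e ((PySem.List.count tuplado e : Nat) : Int)) PySem.Dict.empty
  diccionario.items

-- ===== PORT B =====
-- seed each query word with 0; then for each phrase, for each word, increment if it is a key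
def cuenta_palabras_alt (tupla1 : List String) (tupla2 : List String) : List (String × Int) :=
  let d0 : PySem.Dict String Int :=
    tupla1.foldl (fun d e => d.insert e (0 : Int)) PySem.Dict.empty
  let dfin : PySem.Dict String Int :=
    tupla2.foldl (fun d frase =>
      (PySem.Str.split₀ frase).foldl
        (fun d palabra => if d.contains palabra then d.modify palabra 0 (· + 1) else d) d) d0
  dfin.items

-- ===== PRECONDITION & SPEC =====
def Spec_cuenta_palabras (tupla1 : List String) (tupla2 : List String) (out : List (String × Int)) : Prop := out = cuenta_palabras_alt tupla1 tupla2
instance (tupla1 : List String) (tupla2 : List String) (out : List (String × Int)) : Decidable (Spec_cuenta_palabras tupla1 tupla2 out) := by unfold Spec_cuenta_palabras; infer_instance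

-- ===== CLAIM (what is proved, stated in full; the proofs are below) =====
def Claim_equal_cuenta_palabras : Prop := ∀ (tupla1 : List String) (tupla2 : List String), Dom_cuenta_palabras tupla1 tupla2 → Spec_cuenta_palabras tupla1 tupla2 (cuenta_palabras tupla1 tupla2)

-- ===== LEMMAS AND PROOFS =====

-- A's insert loop: the value stored under k is f k when k was inserted, untouched otherwise
theorem getD_foldl_insert_const {κ : Type} [DecidableEq κ] (f : κ → Int)
    (l : List κ) (d : PySem.Dict κ Int) (k : κ) :
    (l.foldl (fun d e => d.insert e (f e)) d).getD k 0
      = if k ∈ l then f k else d.getD k 0 := by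
  induction l generalizing d with
  | nil => simp
  | cons x xs ih =>
      simp only [List.foldl_cons, ih, List.mem_cons, PySem.Dict.getD_insert]
      by_cases hx : k ∈ xs
      · simp [hx]
      · by_cases hk : k = x <;> simp [hx, hk]

-- B's increment loop: keys are unchanged and each present key gains the count of its occurrences
theorem loopB_spec (words : List String) (d : PySem.Dict String Int) :
    (words.foldl (fun d w => if d.contains w then d.modify w 0 (· + 1) else d) d).keys = d.keys ∧
    ∀ k, (words.foldl (fun d w => if d.contains w then d.modify w 0 (· + 1) else d) d).getD k 0
      = if d.contains k then d.getD k 0 + (words.count k : Int) else d.getD k 0 := by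
  induction words generalizing d with
  | nil => simp
  | cons w ws ih =>
      simp only [List.foldl_cons]
      by_cases hw : d.contains w
      · have hkeys : (d.modify w 0 (· + 1)).keys = d.keys := by
          simp [PySem.Dict.keys_modify, hw, PySem.Dict.keys_insert_of_contains]
        have hcont : ∀ k, (d.modify w 0 (· + 1)).contains k = d.contains k := by
          intro k
          simp [PySem.Dict.contains_eq_decide_mem_keys, hkeys]
        obtain ⟨ihk, ihv⟩ := ih (d.modify w 0 (· + 1))
        refine ⟨by simp [hw, ihk, hkeys], ?_⟩
        intro k
        rw [if_pos hw, ihv k, hcont k, PySem.Dict.getD_modify]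
        by_cases hk : d.contains k
        · rw [if_pos hk, if_pos hk]
          by_cases hkw : k = w
          · subst hkw; simp; ring
          · rw [if_neg hkw]
            have : ¬ w = k := fun h => hkw h.symm
            simp [this]
        · rw [if_neg hk, if_neg hk]
          have hkw : ¬ k = w := fun h => hk (h ▸ hw)
          rw [if_neg hkw]
      · obtain ⟨ihk, ihv⟩ := ih d
        rw [if_neg hw]
        refine ⟨ihk, ?_⟩
        intro k
        rw [ihv k]
        by_cases hk : d.contains k
        · rw [if_pos hk, if_pos hk]
          have hkw : ¬ w = k := fun h => hw (h ▸ hk)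
          simp [hkw]
        · rw [if_neg hk, if_neg hk]

-- the nested per-phrase loop is the flat loop over all words
theorem foldl_nested_eq_flat {α β : Type} (g : α → List β) (f : PySem.Dict String Int → β → PySem.Dict String Int)
    (l : List α) (d : PySem.Dict String Int) :
    l.foldl (fun d x => (g x).foldl f d) d = (l.flatMap g).foldl f d := by
  induction l generalizing d with
  | nil => simp
  | cons x xs ih => simp [List.flatMap_cons, List.foldl_append, ih]

theorem cuenta_palabras_spec : Claim_equal_cuenta_palabras := by
  intro t1 t2 _
  unfold Spec_cuenta_palabras cuenta_palabras cuenta_palabras_alt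
  simp only [PySem.List.foldl_append_eq_flatMap, List.nil_append,
    foldl_nested_eq_flat]
  set words := t2.flatMap PySem.Str.split₀ with hwords
  set dA := t1.foldl (fun d e => d.insert e ((PySem.List.count words e : Nat) : Int)) PySem.Dict.empty with hdA
  set d0 := t1.foldl (fun d e => d.insert e (0 : Int)) PySem.Dict.empty with hd0
  set dB := words.foldl (fun d w => if d.contains w then d.modify w 0 (· + 1) else d) d0 with hdB
  have hkeysA : dA.keys = PySem.Set.ofList t1 := by
    rw [hdA, PySem.Dict.keys_foldl_insert]; rfl
  have hkeys0 : d0.keys = PySem.Set.ofList t1 := by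
    rw [hd0, PySem.Dict.keys_foldl_insert]; rfl
  obtain ⟨hkB, hvB⟩ := loopB_spec words d0
  have hkeysB : dB.keys = PySem.Set.ofList t1 := by rw [hdB, hkB, hkeys0]
  have hndA : dA.keys.Nodup := by
    rw [hdA]; exact PySem.Dict.nodup_keys_foldl_insert _ _ _ PySem.Dict.nodup_keys_empty
  have hndB : dB.keys.Nodup := by
    rw [hkeysB]; exact PySem.Set.nodup_ofList t1
  rw [PySem.Dict.items_eq_map_keys dA hndA 0, PySem.Dict.items_eq_map_keys dB hndB 0,
    hkeysA, hkeysB]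
  apply List.map_congr_left
  intro k hk
  have hk1 : k ∈ t1 := by
    have := PySem.Set.mem_ofList (xs := t1) (y := k); tauto
  have hA : dA.getD k 0 = ((PySem.List.count words k : Nat) : Int) := by
    rw [hdA, getD_foldl_insert_const]; simp [hk1]
  have h0 : d0.getD k 0 = 0 := by
    rw [hd0, getD_foldl_insert_const]; simp [hk1]
  have hc0 : d0.contains k = true := by
    rw [PySem.Dict.contains_eq_decide_mem_keys, hkeys0]
    simp [PySem.Set.mem_ofList, hk1]
  have hB : dB.getD k 0 = (words.count k : Int) := by
    rw [hdB] at *; rw [hvB k, hc0]; simp [h0]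
  simp [hA, hB, PySem.List.count_eq]
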